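-- pv_equiv track=rewrite | github.com/pulkitkulshrestha/Insulin-data-Analysis | cluster-validation-technique.py | BinsFinal
-- ===== SOURCE A (Python) =====
-- def BinsFinal(correct,res,no_Clus):
--     binRes = []
--     bin = []
--     for i in range(no_Clus):
--         binRes.append([])
--         bin.append([])
--     for i in range(len(res)):
--         binRes[res[i]-1].append(i)
--     for i in range(no_Clus):
--         for j in binRes[i]:
--             bin[i].append(correct[j])
--     return bin
-- ===== SOURCE B (Python) =====
-- def BinsFinal(correct, res, no_Clus):
--     bin = [[] for _ in range(no_Clus)]
--     for i in range(len(res)):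
--         bin[res[i] - 1].append(correct[i])
--     return bin
-- ===== Notes on version B (the rewrite author's own statement) =====
-- stated objective: simpler
-- what changed: B makes a single fused pass over res, appending correct[i] directly into its cluster bin, eliminating A's intermediate index-bucket structure (binRes) and the whole second remapping phase.
import Mathlib
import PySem

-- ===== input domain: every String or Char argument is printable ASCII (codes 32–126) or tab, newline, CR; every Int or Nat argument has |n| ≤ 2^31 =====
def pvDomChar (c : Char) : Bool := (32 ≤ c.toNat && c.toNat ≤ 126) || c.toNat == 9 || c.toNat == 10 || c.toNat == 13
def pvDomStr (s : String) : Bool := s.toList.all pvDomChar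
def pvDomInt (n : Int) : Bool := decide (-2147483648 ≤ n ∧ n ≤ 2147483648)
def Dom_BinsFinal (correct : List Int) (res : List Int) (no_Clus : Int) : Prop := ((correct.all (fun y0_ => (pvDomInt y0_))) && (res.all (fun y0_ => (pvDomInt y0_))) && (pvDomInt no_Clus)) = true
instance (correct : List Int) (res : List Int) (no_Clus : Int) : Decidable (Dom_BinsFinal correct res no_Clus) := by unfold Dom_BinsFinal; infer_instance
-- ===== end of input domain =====

-- B replaces A's two-phase build-index-buckets-then-remap with one fused pass appending
-- correct[i] straight into its cluster bin (objective: simpler; same asymptotic cost).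

-- ===== PORT A =====
def BinsFinal (correct : List Int) (res : List Int) (no_Clus : Int) : List (List Int) :=
  -- for i in range(no_Clus): binRes.append([]); bin.append([])
  let init : List (List Int) × List (List Int) :=
    (PySem.List.pyRange 0 no_Clus 1).foldl
      (fun p _ => (p.1 ++ [([] : List Int)], p.2 ++ [([] : List Int)])) ([], [])
  -- for i in range(len(res)): binRes[res[i]-1].append(i)
  let binRes : List (List Int) :=
    (PySem.List.pyRange 0 (res.length : Int) 1).foldl
      (fun br i =>
        PySem.List.pySetD br (PySem.List.pyGetD res i 0 - 1)
          (PySem.List.pyGetD br (PySem.List.pyGetD res i 0 - 1) [] ++ [i])) init.1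
  -- for i in range(no_Clus): for j in binRes[i]: bin[i].append(correct[j])
  (PySem.List.pyRange 0 no_Clus 1).foldl
    (fun bin i =>
      (PySem.List.pyGetD binRes i []).foldl
        (fun bin2 j =>
          PySem.List.pySetD bin2 i
            (PySem.List.pyGetD bin2 i [] ++ [PySem.List.pyGetD correct j 0])) bin)
    init.2

-- ===== PORT B =====
def BinsFinal_alt (correct : List Int) (res : List Int) (no_Clus : Int) : List (List Int) :=
  -- bin = [[] for _ in range(no_Clus)]
  let bin0 : List (List Int) := (PySem.List.pyRange 0 no_Clus 1).map (fun _ => [])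
  -- for i in range(len(res)): bin[res[i]-1].append(correct[i])
  (PySem.List.pyRange 0 (res.length : Int) 1).foldl
    (fun bin i =>
      PySem.List.pySetD bin (PySem.List.pyGetD res i 0 - 1)
        (PySem.List.pyGetD bin (PySem.List.pyGetD res i 0 - 1) [] ++ [PySem.List.pyGetD correct i 0]))
    bin0

-- ===== PRECONDITION & SPEC =====
-- Pre_ excludes exactly the inputs where Python A raises IndexError: a cluster label res[i]
-- whose Python list index res[i]-1 (negative indices count from the end) misses the no_Clus
-- bins, or res longer than correct (so some correct[j] access is out of range).
def Pre_BinsFinal (correct : List Int) (res : List Int) (no_Clus : Int) : Prop :=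
  res.length ≤ correct.length ∧
  ∀ x ∈ res, -(no_Clus.toNat : Int) ≤ x - 1 ∧ x - 1 < (no_Clus.toNat : Int)
instance (correct : List Int) (res : List Int) (no_Clus : Int) : Decidable (Pre_BinsFinal correct res no_Clus) := by unfold Pre_BinsFinal; infer_instance

def pvWitness_BinsFinal : List Int × List Int × Int := ([5, 6, 7], [1, 2, 1], 2)

def Spec_BinsFinal (correct : List Int) (res : List Int) (no_Clus : Int) (out : List (List Int)) : Prop := out = BinsFinal_alt correct res no_Clus
instance (correct : List Int) (res : List Int) (no_Clus : Int) (out : List (List Int)) : Decidable (Spec_BinsFinal correct res no_Clus out) := by unfold Spec_BinsFinal; infer_instance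

-- ===== CLAIM (what is proved, stated in full; the proofs are below) =====
def Claim_equal_BinsFinal : Prop := ∀ (correct : List Int) (res : List Int) (no_Clus : Int), Dom_BinsFinal correct res no_Clus → Pre_BinsFinal correct res no_Clus → Spec_BinsFinal correct res no_Clus (BinsFinal correct res no_Clus)

-- ===== LEMMAS AND PROOFS =====

-- pyIdx? only produces in-range indices
lemma pvIdx_lt {n : Nat} {i : Int} {k : Nat} (h : PySem.List.pyIdx? n i = some k) : k < n := by
  unfold PySem.List.pyIdx? at h
  split_ifs at h <;> simp_all <;> omega

-- the first loop builds two identical lists of empties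
lemma pvInitPair (l : List Int) (b1 b2 : List (List Int)) :
    l.foldl (fun (p : List (List Int) × List (List Int)) (_ : Int) =>
        (p.1 ++ [([] : List Int)], p.2 ++ [([] : List Int)])) (b1, b2)
      = (b1 ++ l.map (fun _ => []), b2 ++ l.map (fun _ => [])) := by
  induction l generalizing b1 b2 with
  | nil => simp
  | cons a t ih => simp [ih]

-- its k-th bin is the base bin followed by the extensions routed to slot k, in order
lemma pvBucketGet {i : Type} (ps : List i) (idx : i → Int) (ext : i → List Int)
    (b : List (List Int)) (k : Nat) :
    (ps.foldl (fun c p =>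
        PySem.List.pySetD c (idx p) (PySem.List.pyGetD c (idx p) [] ++ ext p)) b)[k]?
      = (b[k]?).map
          (· ++ (ps.filter (fun p => PySem.List.pyIdx? b.length (idx p) == some k)).flatMap ext) := by
  induction ps generalizing b with
  | nil => simp
  | cons p t ih =>
    rw [List.foldl_cons, List.filter_cons]
    cases h : PySem.List.pyIdx? b.length (idx p) with
    | none =>
      have hset : PySem.List.pySetD b (idx p) (PySem.List.pyGetD b (idx p) [] ++ ext p) = b := by
        simp [PySem.List.pySetD, PySem.List.pySet?, h]
      simp [hset, ih]
    | some j =>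
      have hj : j < b.length := pvIdx_lt h
      have hget : PySem.List.pyGetD b (idx p) [] = b[j] := by
        simp [PySem.List.pyGetD, PySem.List.pyGet?, h, List.getElem?_eq_getElem hj]
      have hset : PySem.List.pySetD b (idx p) (PySem.List.pyGetD b (idx p) [] ++ ext p)
          = b.set j (b[j] ++ ext p) := by
        simp [PySem.List.pySetD, PySem.List.pySet?, h, hget]
      rw [hset, ih, List.length_set]
      by_cases hk : j = k
      · subst hk
        simp [List.getElem?_set_self hj, List.getElem?_eq_getElem hj]
      · simp [hk, List.getElem?_set_ne hk]

-- the inner loop of A's third phase collapses to one in-place list extension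
lemma pvInner (l : List Int) (g : Int → Int) (i : Int) (bin : List (List Int)) :
    l.foldl (fun c j => PySem.List.pySetD c i (PySem.List.pyGetD c i [] ++ [g j])) bin
      = PySem.List.pySetD bin i (PySem.List.pyGetD bin i [] ++ l.map g) := by
  induction l generalizing bin with
  | nil =>
    cases h : PySem.List.pyIdx? bin.length i with
    | none => simp [PySem.List.pySetD, PySem.List.pySet?, h]
    | some j =>
      have hj : j < bin.length := pvIdx_lt h
      simp [PySem.List.pySetD, PySem.List.pySet?, PySem.List.pyGetD, PySem.List.pyGet?, h,
        List.getElem?_eq_getElem hj, List.set_getElem_self]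
  | cons a t ih =>
    rw [List.foldl_cons]
    cases h : PySem.List.pyIdx? bin.length i with
    | none =>
      have hset : ∀ v, PySem.List.pySetD bin i v = bin := by
        intro v; simp [PySem.List.pySetD, PySem.List.pySet?, h]
      rw [hset, ih, hset, hset]
    | some j =>
      have hj : j < bin.length := pvIdx_lt h
      have hget : PySem.List.pyGetD bin i [] = bin[j] := by
        simp [PySem.List.pyGetD, PySem.List.pyGet?, h, List.getElem?_eq_getElem hj]
      rw [hget]
      have hset : ∀ v, PySem.List.pySetD bin i v = bin.set j v := by
        intro v; simp [PySem.List.pySetD, PySem.List.pySet?, h]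
      rw [hset, ih]
      have hjs : j < (bin.set j (bin[j] ++ [g a])).length := by simpa using hj
      have hget2 : PySem.List.pyGetD (bin.set j (bin[j] ++ [g a])) i [] = bin[j] ++ [g a] := by
        simp [PySem.List.pyGetD, PySem.List.pyGet?, h, List.getElem?_set_self hj]
      have hset2 : ∀ v, PySem.List.pySetD (bin.set j (bin[j] ++ [g a])) i v
          = (bin.set j (bin[j] ++ [g a])).set j v := by
        intro v; simp [PySem.List.pySetD, PySem.List.pySet?, h]
      rw [hget2, hset2, hset, List.set_set]
      simp

-- length of a diagonal set/extend fold over range n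
lemma pvDiagLen (n : Nat) (ext : Nat → List Int) (b : List (List Int)) :
    ((List.range n).foldl (fun c j => c.set j (c.getD j [] ++ ext j)) b).length = b.length := by
  induction n with
  | zero => rfl
  | succ n ih => rw [List.range_succ, List.foldl_append, List.foldl_cons, List.foldl_nil,
      List.length_set, ih]

-- k-th entry of the diagonal fold: slot k gets extended by ext k exactly when k < n
lemma pvDiagGet (n : Nat) (ext : Nat → List Int) (b : List (List Int)) :
    ∀ k : Nat, ((List.range n).foldl (fun c j => c.set j (c.getD j [] ++ ext j)) b)[k]?
      = if k < n then (b[k]?).map (· ++ ext k) else b[k]? := by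
  induction n with
  | zero => intro k; simp
  | succ n ih =>
    intro k
    rw [List.range_succ, List.foldl_append, List.foldl_cons, List.foldl_nil]
    by_cases hk : k = n
    · subst hk
      by_cases hn : k < b.length
      · have hn' : k < ((List.range k).foldl (fun c j => c.set j (c.getD j [] ++ ext j)) b).length := by
          rw [pvDiagLen]; exact hn
        rw [List.getElem?_set_self hn']
        have hgd : ((List.range k).foldl (fun c j => c.set j (c.getD j [] ++ ext j)) b).getD k []
            = b[k] := by
          rw [List.getD_eq_getElem?_getD, ih k]
          simp [List.getElem?_eq_getElem hn]
        rw [hgd]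
        simp [List.getElem?_eq_getElem hn]
      · rw [Nat.not_lt] at hn
        have hn' : ((List.range k).foldl (fun c j => c.set j (c.getD j [] ++ ext j)) b).length ≤ k := by
          rw [pvDiagLen]; omega
        rw [List.set_eq_of_length_le hn', ih k]
        simp [List.getElem?_eq_none (by omega : b.length ≤ k)]
    · rw [List.getElem?_set_ne (fun h => hk h.symm), ih k]
      by_cases h2 : k < n
      · rw [if_pos h2, if_pos (by omega)]
      · rw [if_neg h2, if_neg (by omega)]

-- the whole equivalence, with the accesses res[i] and correct[j] abstracted as functions
lemma pvMain (r g : Int → Int) (m N : Int) :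
    (PySem.List.pyRange 0 N 1).foldl
      (fun bin i =>
        (PySem.List.pyGetD
          ((PySem.List.pyRange 0 m 1).foldl
            (fun br i => PySem.List.pySetD br (r i - 1)
              (PySem.List.pyGetD br (r i - 1) [] ++ [i]))
            ((PySem.List.pyRange 0 N 1).foldl
              (fun p (_ : Int) => (p.1 ++ [([] : List Int)], p.2 ++ [([] : List Int)]))
              (([] : List (List Int)), ([] : List (List Int)))).1)
          i []).foldl
          (fun bin2 j => PySem.List.pySetD bin2 i (PySem.List.pyGetD bin2 i [] ++ [g j])) bin)
      ((PySem.List.pyRange 0 N 1).foldl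
        (fun p (_ : Int) => (p.1 ++ [([] : List Int)], p.2 ++ [([] : List Int)]))
        (([] : List (List Int)), ([] : List (List Int)))).2
    = (PySem.List.pyRange 0 m 1).foldl
        (fun bin i => PySem.List.pySetD bin (r i - 1)
          (PySem.List.pyGetD bin (r i - 1) [] ++ [g i]))
        ((PySem.List.pyRange 0 N 1).map (fun _ => [])) := by
  rw [pvInitPair]
  simp only [List.nil_append]
  set R : List (List Int) := (PySem.List.pyRange 0 N 1).map (fun _ => []) with hR
  set C : Nat := N.toNat with hC
  have hRrep : R = List.replicate C [] := by
    rw [hR, List.map_const', PySem.List.length_pyRange_one, hC, sub_zero]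
  have hRlen : R.length = C := by rw [hRrep, List.length_replicate]
  set binRes : List (List Int) :=
    (PySem.List.pyRange 0 m 1).foldl
      (fun br i => PySem.List.pySetD br (r i - 1)
        (PySem.List.pyGetD br (r i - 1) [] ++ [i])) R with hBR
  set F : Nat → List Int := fun k =>
    (PySem.List.pyRange 0 m 1).filter
      (fun i => PySem.List.pyIdx? C (r i - 1) == some k) with hF
  have hbrGet : ∀ k : Nat, k < C → binRes[k]? = some (F k) := by
    intro k hk
    rw [hBR, pvBucketGet, hRlen, hRrep, List.getElem?_replicate, if_pos hk]
    simp [hF]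
  have hInnerFun :
      (fun (bin : List (List Int)) (i : Int) =>
        (PySem.List.pyGetD binRes i []).foldl
          (fun bin2 j => PySem.List.pySetD bin2 i
            (PySem.List.pyGetD bin2 i [] ++ [g j])) bin)
      = (fun bin i => PySem.List.pySetD bin i
          (PySem.List.pyGetD bin i [] ++ (PySem.List.pyGetD binRes i []).map g)) :=
    funext fun bin => funext fun i => pvInner _ g i bin
  rw [hInnerFun]
  have hFold : ∀ (G : List (List Int) → Int → List (List Int)) (b : List (List Int)),
      (PySem.List.pyRange 0 N 1).foldl G b
        = (List.range C).foldl (fun c (k : Nat) => G c ((k : Nat) : Int)) b := by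
    intro G b
    rw [PySem.List.pyRange_one, sub_zero, hC, List.foldl_map]
    simp only [zero_add]
  rw [hFold]
  simp only [PySem.List.pySetD_natCast, PySem.List.pyGetD_natCast]
  apply List.ext_getElem?
  intro k
  rw [pvDiagGet C (fun j => (binRes.getD j []).map g) R k, pvBucketGet, hRlen]
  by_cases hkC : k < C
  · rw [if_pos hkC, hRrep, List.getElem?_replicate, if_pos hkC]
    have hgd : binRes.getD k [] = F k := by
      rw [List.getD_eq_getElem?_getD, hbrGet k hkC]; rfl
    rw [hgd, hF]
    simp [List.map_eq_flatMap]
  · rw [if_neg hkC, hRrep, List.getElem?_replicate, if_neg hkC]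
    simp

-- ===== VERDICT (by name: the statement is the Claim_ definition above) =====
theorem BinsFinal_spec : Claim_equal_BinsFinal := by
  intro correct res no_Clus _ _
  unfold Spec_BinsFinal BinsFinal BinsFinal_alt
  exact pvMain (fun i => PySem.List.pyGetD res i 0) (fun j => PySem.List.pyGetD correct j 0)
    (res.length : Int) no_Clus
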